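-- pv_equiv track=rewrite | github.com/RaphaelBRodrigues/computer-science-degree | quarto_semestre/TE/Lista_3/1.py | calc
-- ===== SOURCE A (Python) =====
-- def calc(number):
--   double = number * 2
--   multiplied = number * 5
--   factorial = 1
--
--   while number > 0:
--     factorial *= number
--     number -= 1
--
--   return [double, multiplied, factorial]
-- ===== SOURCE B (Python) =====
-- def _prod(a, b):
--     """Product of the integers in the interval (a, b]; requires b > a."""
--     if b - a <= 1:
--         return b
--     m = (a + b) // 2
--     return _prod(a, m) * _prod(m, b)
--
-- def calc(number):
--     factorial = _prod(0, number) if number > 0 else 1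
--     return [number * 2, number * 5, factorial]
-- ===== Notes on version B (the rewrite author's own statement) =====
-- stated objective: alternative
-- what changed: The while-loop multiplying one big accumulator n times is replaced by a divide-and-conquer product over the interval (0, n], which balances the big-integer multiplications.
import Mathlib
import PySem

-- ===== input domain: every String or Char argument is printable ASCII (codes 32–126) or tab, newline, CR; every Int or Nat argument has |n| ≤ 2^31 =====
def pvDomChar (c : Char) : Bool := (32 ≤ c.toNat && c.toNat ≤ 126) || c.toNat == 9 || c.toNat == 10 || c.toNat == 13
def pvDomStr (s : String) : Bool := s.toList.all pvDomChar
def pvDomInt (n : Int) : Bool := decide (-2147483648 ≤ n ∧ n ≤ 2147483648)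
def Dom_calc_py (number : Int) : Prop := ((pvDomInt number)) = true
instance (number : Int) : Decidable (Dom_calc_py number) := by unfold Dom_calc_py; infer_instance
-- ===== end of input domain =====

-- B replaces the while-loop's linear accumulator by a divide-and-conquer product over (0, n] (objective: alternative).

-- ===== PORT A =====
-- A's while-loop: state (number, factorial), loop while number > 0
def calcLoop (number factorial : Int) : Int :=
  if number > 0 then calcLoop (number - 1) (factorial * number) else factorial
termination_by number.toNat
decreasing_by omega

def calc_py (number : Int) : List Int :=
  let double := number * 2
  let multiplied := number * 5
  let factorial := calcLoop number 1
  [double, multiplied, factorial]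

-- ===== PORT B =====
-- product of the integers in (a, b]; Source B's `_prod`
def prodRange (a b : Int) : Int :=
  if b - a ≤ 1 then b
  else
    let m := PySem.Int.floordiv (a + b) 2
    prodRange a m * prodRange m b
termination_by (b - a).toNat
decreasing_by
  all_goals
    simp only [PySem.Int.floordiv_eq_ediv_of_pos (by omega : (0:Int) < 2)] at *
    omega

def calc_py_alt (number : Int) : List Int :=
  let factorial := if number > 0 then prodRange 0 number else 1
  [number * 2, number * 5, factorial]

-- ===== PRECONDITION & SPEC =====
def Spec_calc_py (number : Int) (out : List Int) : Prop := out = calc_py_alt number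
instance (number : Int) (out : List Int) : Decidable (Spec_calc_py number out) := by unfold Spec_calc_py; infer_instance

-- ===== CLAIM (what is proved, stated in full; the proofs are below) =====
def Claim_equal_calc_py : Prop := ∀ (number : Int), Dom_calc_py number → Spec_calc_py number (calc_py number)

-- ===== LEMMAS AND PROOFS =====
-- linear product of the integers in (a, b] (proof-only reference function)
def prodLin (a b : Int) : Int :=
  if b ≤ a then 1 else prodLin a (b - 1) * b
termination_by (b - a).toNat
decreasing_by omega

theorem calcLoop_eq (n f : Int) : calcLoop n f = f * prodLin 0 n := by
  by_cases h : n > 0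
  · rw [calcLoop, prodLin, if_pos h, if_neg (by omega)]
    rw [calcLoop_eq (n - 1) (f * n)]
    ring
  · rw [calcLoop, prodLin, if_neg h, if_pos (by omega)]
    ring
termination_by n.toNat
decreasing_by omega

theorem prodLin_split (a m b : Int) (h1 : a ≤ m) (h2 : m ≤ b) :
    prodLin a m * prodLin m b = prodLin a b := by
  by_cases h : b ≤ m
  · have hbm : b = m := le_antisymm h h2
    subst hbm
    have h0 : prodLin b b = 1 := by rw [prodLin]; simp
    rw [h0, mul_one]
  · have hR : prodLin m b = prodLin m (b - 1) * b := by
      rw [prodLin, if_neg h]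
    have hL : prodLin a b = prodLin a (b - 1) * b := by
      conv_lhs => rw [prodLin]
      rw [if_neg (by omega : ¬ b ≤ a)]
    rw [hR, hL, ← mul_assoc, prodLin_split a m (b - 1) h1 (by omega)]
termination_by (b - m).toNat
decreasing_by omega

theorem prodRange_eq (a b : Int) (h : a < b) : prodRange a b = prodLin a b := by
  by_cases h1 : b - a ≤ 1
  · have hb : b = a + 1 := by omega
    rw [prodRange, if_pos h1, prodLin, if_neg (by omega), prodLin, if_pos (by omega)]
    omega
  · rw [prodRange, if_neg h1]
    show prodRange a (PySem.Int.floordiv (a + b) 2) * prodRange (PySem.Int.floordiv (a + b) 2) b = prodLin a b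
    have hm := PySem.Int.floordiv_eq_ediv_of_pos (a := a + b) (by omega : (0:Int) < 2)
    have hlo : a < PySem.Int.floordiv (a + b) 2 := by rw [hm]; omega
    have hhi : PySem.Int.floordiv (a + b) 2 < b := by rw [hm]; omega
    rw [prodRange_eq a _ hlo, prodRange_eq _ b hhi,
      prodLin_split a _ b (by omega) (by omega)]
termination_by (b - a).toNat
decreasing_by
  all_goals
    simp only [PySem.Int.floordiv_eq_ediv_of_pos (by omega : (0:Int) < 2)] at *
    omega

-- ===== VERDICT (by name: the statement is the Claim_ definition above) =====
theorem calc_py_spec : Claim_equal_calc_py := by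
  intro n _
  show _ = _
  simp only [calc_py, calc_py_alt]
  by_cases h : n > 0
  · simp [h, calcLoop_eq, prodRange_eq 0 n h]
  · simp only [if_neg h, calcLoop_eq]
    rw [prodLin, if_pos (by omega)]
    simp
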